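-- pv_equiv track=rewrite | github.com/hhhyx0410/New-OCR | main.py | normalize_rope_access
-- ===== SOURCE A (Python) =====
-- VALUE_ALIASES = {
--     "405\u00d7": "405X",
--     "&": "8",
--     "\u4e4b": "2",
--     "\u4e00": "-",
--     "DW": "DW",
-- }
--
-- def normalize_text(text: str) -> str:
--     text = " ".join(str(text).strip().split())
--     return VALUE_ALIASES.get(text, text)
--
-- def normalize_rope_access(value: str) -> str:
--     value = normalize_text(value)
--     if not value:
--         return "NA"
--
--     compact = value.upper().replace(" ", "")
--     compact = compact.replace("$", "").replace(".", "")
--     compact = compact.replace("O", "0").replace("I", "1").replace("L", "1")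
--     compact = compact.replace("B", "8").replace("S", "5").replace("G", "6")
--     digits = "".join(char for char in compact if char.isdigit())
--
--     if digits:
--         return "$10"
--     return "NA"
-- ===== SOURCE B (Python) =====
-- VALUE_ALIASES = {
--     "405\u00d7": "405X",
--     "&": "8",
--     "\u4e4b": "2",
--     "\u4e00": "-",
--     "DW": "DW",
-- }
--
-- def normalize_text(text: str) -> str:
--     text = " ".join(str(text).strip().split())
--     return VALUE_ALIASES.get(text, text)
--
-- DIGIT_SOURCES = frozenset("OILBSG")
--
-- def normalize_rope_access(value: str) -> str:
--     value = normalize_text(value)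
--     if not value:
--         return "NA"
--     for char in value.upper():
--         if char.isdigit() or char in DIGIT_SOURCES:
--             return "$10"
--     return "NA"
-- ===== Notes on version B (the rewrite author's own statement) =====
-- stated objective: simpler
-- what changed: Replaces the transform pipeline (six letter-mapping .replace passes building intermediate strings, then a comprehension collecting the digits, then a truthiness test) with a single early-exit scan over the uppercased value that stops at the first digit or digit-producing letter (O,I,L,B,S,G) and materializes nothing.
import Mathlib
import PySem

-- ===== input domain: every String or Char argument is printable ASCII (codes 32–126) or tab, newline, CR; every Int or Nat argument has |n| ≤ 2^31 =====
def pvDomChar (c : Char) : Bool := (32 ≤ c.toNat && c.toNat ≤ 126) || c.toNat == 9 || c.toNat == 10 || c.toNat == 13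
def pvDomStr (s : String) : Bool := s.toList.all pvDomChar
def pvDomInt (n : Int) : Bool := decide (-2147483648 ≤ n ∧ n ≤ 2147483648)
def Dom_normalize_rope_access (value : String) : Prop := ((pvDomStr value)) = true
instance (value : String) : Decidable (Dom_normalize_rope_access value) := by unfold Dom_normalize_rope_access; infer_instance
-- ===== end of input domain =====

-- B replaces A's replace-pipeline + digit-comprehension with a single early-exit scan for a
-- digit or digit-producing letter (simpler decomposition; same asymptotic cost).


-- ===== PORT A =====
def pv_normalize_text (text : String) : String :=
  let t := PySem.Str.join " " (PySem.Str.split₀ (PySem.Str.strip text))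
  (PySem.Dict.ofList [("405×", "405X"), ("&", "8"), ("之", "2"), ("一", "-"), ("DW", "DW")]).getD t t

def normalize_rope_access (value : String) : String :=
  let value := pv_normalize_text value
  if PySem.Str.len value = 0 then "NA"
  else
    let compact := PySem.Str.replace (PySem.Str.upper value) " " ""
    let compact := PySem.Str.replace (PySem.Str.replace compact "$" "") "." ""
    let compact := PySem.Str.replace (PySem.Str.replace (PySem.Str.replace compact "O" "0") "I" "1") "L" "1"
    let compact := PySem.Str.replace (PySem.Str.replace (PySem.Str.replace compact "B" "8") "S" "5") "G" "6"
    let digits := PySem.Str.join "" ((compact.toList.filter PySem.Chars.isdigit).map (fun c => String.ofList [c]))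
    if PySem.Str.len digits ≠ 0 then "$10" else "NA"

-- ===== PORT B =====
def pv_digit_sources : List Char := ['O', 'I', 'L', 'B', 'S', 'G']

def pv_scan : List Char → String
  | [] => "NA"
  | c :: rest => if PySem.Chars.isdigit c || pv_digit_sources.contains c then "$10" else pv_scan rest

def normalize_rope_access_alt (value : String) : String :=
  let v := pv_normalize_text value
  if PySem.Str.len v = 0 then "NA" else pv_scan (PySem.Str.upper v).toList

-- ===== PRECONDITION & SPEC =====
def Spec_normalize_rope_access (value : String) (out : String) : Prop := out = normalize_rope_access_alt value
instance (value : String) (out : String) : Decidable (Spec_normalize_rope_access value out) := by unfold Spec_normalize_rope_access; infer_instance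

-- ===== CLAIM (what is proved, stated in full; the proofs are below) =====
def Claim_equal_normalize_rope_access : Prop := ∀ (value : String), Dom_normalize_rope_access value → Spec_normalize_rope_access value (normalize_rope_access value)

-- ===== LEMMAS AND PROOFS =====

-- single-character pattern replace is a flatMap
theorem pv_go_single (a : Char) (new : List Char) :
    ∀ (fuel : Nat) (l acc : List Char), l.length ≤ fuel →
      PySem.Chars.replace.go [a] new fuel l acc
        = acc.reverse ++ l.flatMap (fun c => if c = a then new else [c]) := by
  intro fuel
  induction fuel with
  | zero =>
    intro l acc h
    have : l = [] := List.length_eq_zero_iff.mp (Nat.le_zero.mp h)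
    subst this
    simp [PySem.Chars.replace.go]
  | succ n ih =>
    intro l acc h
    cases l with
    | nil => simp [PySem.Chars.replace.go]
    | cons c t =>
      by_cases hc : c = a
      · subst hc
        have hpre : List.isPrefixOf [c] (c :: t) = true := by
          simp [List.isPrefixOf]
        rw [show PySem.Chars.replace.go [c] new (n+1) (c :: t) acc
              = PySem.Chars.replace.go [c] new n t (new.reverse ++ acc) from by
            conv_lhs => rw [PySem.Chars.replace.go]
            simp [hpre]]
        rw [ih t (new.reverse ++ acc) (by simpa using Nat.lt_succ_iff.mp (by simpa using h))]
        simp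
      · have hpre : List.isPrefixOf [a] (c :: t) = false := by
          simp [List.isPrefixOf]
          intro h'; exact hc h'.symm
        rw [show PySem.Chars.replace.go [a] new (n+1) (c :: t) acc
              = PySem.Chars.replace.go [a] new n t (c :: acc) from by
            conv_lhs => rw [PySem.Chars.replace.go]
            simp [hpre]]
        rw [ih t (c :: acc) (by simpa using Nat.lt_succ_iff.mp (by simpa using h))]
        simp [hc]

theorem pv_replace_single (cs : List Char) (a : Char) (new : List Char) :
    PySem.Chars.replace cs [a] new = cs.flatMap (fun c => if c = a then new else [c]) := by
  rw [PySem.Chars.replace]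
  simp [pv_go_single a new cs.length cs [] le_rfl]

-- the composed per-character effect of A's replace chain
def pv_Fc (c : Char) : List Char :=
  if c = ' ' ∨ c = '$' ∨ c = '.' then []
  else if c = 'O' then ['0']
  else if c = 'I' ∨ c = 'L' then ['1']
  else if c = 'B' then ['8']
  else if c = 'S' then ['5']
  else if c = 'G' then ['6']
  else [c]

def pv_step (c : Char) : List Char :=
  (if c = ' ' then ([] : List Char) else [c]).flatMap fun x =>
  (if x = '$' then ([] : List Char) else [x]).flatMap fun x =>
  (if x = '.' then ([] : List Char) else [x]).flatMap fun x =>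
  (if x = 'O' then ['0'] else [x]).flatMap fun x =>
  (if x = 'I' then ['1'] else [x]).flatMap fun x =>
  (if x = 'L' then ['1'] else [x]).flatMap fun x =>
  (if x = 'B' then ['8'] else [x]).flatMap fun x =>
  (if x = 'S' then ['5'] else [x]).flatMap fun x =>
  (if x = 'G' then ['6'] else [x])

theorem pv_step_eq (c : Char) : pv_step c = pv_Fc c := by
  by_cases h1 : c = ' '
  · subst h1; decide
  by_cases h2 : c = '$'
  · subst h2; decide
  by_cases h3 : c = '.'
  · subst h3; decide
  by_cases h4 : c = 'O'
  · subst h4; decide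
  by_cases h5 : c = 'I'
  · subst h5; decide
  by_cases h6 : c = 'L'
  · subst h6; decide
  by_cases h7 : c = 'B'
  · subst h7; decide
  by_cases h8 : c = 'S'
  · subst h8; decide
  by_cases h9 : c = 'G'
  · subst h9; decide
  simp [pv_step, pv_Fc, h1, h2, h3, h4, h5, h6, h7, h8, h9]

theorem pv_chain_eq (ys : List Char) :
    PySem.Chars.replace (PySem.Chars.replace (PySem.Chars.replace (PySem.Chars.replace
      (PySem.Chars.replace (PySem.Chars.replace (PySem.Chars.replace (PySem.Chars.replace
        (PySem.Chars.replace ys [' '] []) ['$'] []) ['.'] []) ['O'] ['0']) ['I'] ['1'])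
      ['L'] ['1']) ['B'] ['8']) ['S'] ['5']) ['G'] ['6']
    = ys.flatMap pv_Fc := by
  simp only [pv_replace_single, List.flatMap_assoc]
  congr 1
  funext c
  exact pv_step_eq c

-- the predicate B tests
def pv_p (c : Char) : Bool := PySem.Chars.isdigit c || pv_digit_sources.contains c

theorem pv_Fc_filter (c : Char) : ((pv_Fc c).filter PySem.Chars.isdigit ≠ []) ↔ pv_p c = true := by
  by_cases h1 : c = ' '
  · subst h1; decide
  by_cases h2 : c = '$'
  · subst h2; decide
  by_cases h3 : c = '.'
  · subst h3; decide
  by_cases h4 : c = 'O'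
  · subst h4; decide
  by_cases h5 : c = 'I'
  · subst h5; decide
  by_cases h6 : c = 'L'
  · subst h6; decide
  by_cases h7 : c = 'B'
  · subst h7; decide
  by_cases h8 : c = 'S'
  · subst h8; decide
  by_cases h9 : c = 'G'
  · subst h9; decide
  have hmem : c ∉ pv_digit_sources := by
    simp [pv_digit_sources]
    exact ⟨h4, h5, h6, h7, h8, h9⟩
  simp [pv_Fc, pv_p, h1, h2, h3, h4, h5, h6, h7, h8, h9, hmem, List.filter]
  by_cases hd : PySem.Chars.isdigit c <;> simp [hd]

theorem pv_scan_eq (cs : List Char) : pv_scan cs = if cs.any pv_p then "$10" else "NA" := by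
  induction cs with
  | nil => simp [pv_scan]
  | cons c t ih =>
    rw [pv_scan, ih]
    by_cases h : (PySem.Chars.isdigit c || pv_digit_sources.contains c) = true
    · rw [if_pos h]
      have hp : pv_p c = true := by simpa [pv_p] using h
      simp [List.any_cons, hp]
    · rw [if_neg h]
      simp only [List.any_cons]
      have hp : pv_p c = false := by
        simpa [pv_p] using h
      simp [hp]

theorem pv_sp : (" " : String).toList = [' '] := by decide
theorem pv_emp : ("" : String).toList = [] := by decide
theorem pv_dol : ("$" : String).toList = ['$'] := by decide
theorem pv_dot : ("." : String).toList = ['.'] := by decide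
theorem pv_O : ("O" : String).toList = ['O'] := by decide
theorem pv_0 : ("0" : String).toList = ['0'] := by decide
theorem pv_I : ("I" : String).toList = ['I'] := by decide
theorem pv_1 : ("1" : String).toList = ['1'] := by decide
theorem pv_L : ("L" : String).toList = ['L'] := by decide
theorem pv_B : ("B" : String).toList = ['B'] := by decide
theorem pv_8 : ("8" : String).toList = ['8'] := by decide
theorem pv_S : ("S" : String).toList = ['S'] := by decide
theorem pv_5 : ("5" : String).toList = ['5'] := by decide
theorem pv_G : ("G" : String).toList = ['G'] := by decide
theorem pv_6 : ("6" : String).toList = ['6'] := by decide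

theorem pv_main (v : String) :
    (if PySem.Str.len (PySem.Str.join ""
        (((PySem.Str.replace (PySem.Str.replace (PySem.Str.replace (PySem.Str.replace
          (PySem.Str.replace (PySem.Str.replace (PySem.Str.replace (PySem.Str.replace
            (PySem.Str.replace (PySem.Str.upper v) " " "") "$" "") "." "") "O" "0") "I" "1")
          "L" "1") "B" "8") "S" "5") "G" "6").toList.filter PySem.Chars.isdigit).map
          (fun c => String.ofList [c]))) ≠ 0 then "$10" else "NA")
    = pv_scan (PySem.Str.upper v).toList := by
  rw [pv_scan_eq]
  have hchain :
      (PySem.Str.replace (PySem.Str.replace (PySem.Str.replace (PySem.Str.replace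
        (PySem.Str.replace (PySem.Str.replace (PySem.Str.replace (PySem.Str.replace
          (PySem.Str.replace (PySem.Str.upper v) " " "") "$" "") "." "") "O" "0") "I" "1")
        "L" "1") "B" "8") "S" "5") "G" "6").toList
      = ((PySem.Str.upper v).toList).flatMap pv_Fc := by
    simp only [PySem.Str.toList_replace, pv_sp, pv_emp, pv_dol, pv_dot, pv_O, pv_0, pv_I,
      pv_1, pv_L, pv_B, pv_8, pv_S, pv_5, pv_G, pv_6]
    exact pv_chain_eq _
  rw [hchain]
  generalize (PySem.Str.upper v).toList = us
  have hlen : PySem.Str.len (PySem.Str.join ""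
      (((us.flatMap pv_Fc).filter PySem.Chars.isdigit).map (fun c => String.ofList [c])))
      = ((us.flatMap pv_Fc).filter PySem.Chars.isdigit).length := by
    simp [PySem.Str.len_eq, PySem.Str.toList_join, Function.comp_def]
  rw [hlen]
  have hiff : ((us.flatMap pv_Fc).filter PySem.Chars.isdigit ≠ []) ↔ us.any pv_p = true := by
    rw [List.filter_flatMap]
    constructor
    · intro h
      by_contra hna
      apply h
      rw [List.flatMap_eq_nil_iff]
      intro c hc
      by_contra hne
      exact hna (List.any_eq_true.mpr ⟨c, hc, (pv_Fc_filter c).mp hne⟩)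
    · intro h hnil
      obtain ⟨c, hc, hp⟩ := List.any_eq_true.mp h
      exact (pv_Fc_filter c).mpr hp (List.flatMap_eq_nil_iff.mp hnil c hc)
  by_cases hany : us.any pv_p = true
  · have hne := hiff.mpr hany
    rw [if_pos (by simpa [← List.length_eq_zero_iff] using hne), if_pos hany]
  · have heq : (us.flatMap pv_Fc).filter PySem.Chars.isdigit = [] := by
      by_contra hne; exact hany (hiff.mp hne)
    rw [if_neg (by simp [heq]), if_neg hany]

-- ===== VERDICT (by name: the statement is the Claim_ definition above) =====
theorem normalize_rope_access_spec : Claim_equal_normalize_rope_access := by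
  intro value _
  unfold Spec_normalize_rope_access
  simp only [normalize_rope_access, normalize_rope_access_alt]
  by_cases h0 : PySem.Str.len (pv_normalize_text value) = 0
  · rw [if_pos h0, if_pos h0]
  · rw [if_neg h0, if_neg h0]
    exact pv_main (pv_normalize_text value)
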